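-- pv_equiv track=rewrite | github.com/Ivareh/TDT4117-Informasjonsgjenfinning | Assignment 4/assignment task 1.py | blockify
-- ===== SOURCE A (Python) =====
-- def blockify(filtered_words, block_size):
--     words_to_block = []
--     block_number = 0
--     for term in filtered_words:
--         if(len(words_to_block) % block_size == 0 ):
--             block_number = block_number + 1
--         words_to_block.append((term, block_number))
--     return words_to_block
-- ===== SOURCE B (Python) =====
-- def blockify(filtered_words, block_size):
--     out = []
--     for number, start in enumerate(range(0, len(filtered_words), block_size), start=1):
--         out += [(term, number) for term in filtered_words[start:start + block_size]]
--     return out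
-- ===== Notes on version B (the rewrite author's own statement) =====
-- stated objective: alternative
-- what changed: Iterates per block instead of per word: enumerates the chunk start indices (range with step block_size) and tags each whole slice with its block number, removing the per-word conditional counter increment; Pre_ restricts to positive block sizes (the natural domain: A raises ZeroDivisionError at 0, and A's tagging for negative sizes is an accident of Python's modulo sign rules, where B returns []).
-- outside the precondition, e.g. on blockify(['a', 'b', 'c'], -2): A returns [('a', 1), ('b', 1), ('c', 2)], B returns []; on blockify(['a'], 0): A raises ZeroDivisionError, B raises ValueError
import Mathlib
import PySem

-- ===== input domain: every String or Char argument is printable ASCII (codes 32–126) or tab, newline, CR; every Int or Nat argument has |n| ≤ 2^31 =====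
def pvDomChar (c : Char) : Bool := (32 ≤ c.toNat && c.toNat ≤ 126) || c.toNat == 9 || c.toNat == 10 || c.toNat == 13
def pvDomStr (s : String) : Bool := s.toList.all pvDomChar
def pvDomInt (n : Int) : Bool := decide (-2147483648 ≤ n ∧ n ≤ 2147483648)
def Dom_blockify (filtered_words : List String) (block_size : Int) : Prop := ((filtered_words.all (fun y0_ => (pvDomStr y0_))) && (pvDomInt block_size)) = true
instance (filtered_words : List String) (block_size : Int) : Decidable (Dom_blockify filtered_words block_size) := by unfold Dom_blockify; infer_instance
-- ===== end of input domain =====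

-- B iterates per block (enumerate over chunk start indices, tag each whole slice with its
-- block number) instead of A's per-word loop with a conditional counter increment; objective: alternative.

-- ===== PORT A =====
-- the for-loop, carrying the accumulated list and the current block_number
def blockifyLoop (block_size : Int) : List String → List (String × Int) × Int → List (String × Int) × Int
  | [], st => st
  | term :: rest, (acc, bn) =>
      let bn' := if PySem.Int.mod (acc.length : Int) block_size = 0 then bn + 1 else bn
      blockifyLoop block_size rest (acc ++ [(term, bn')], bn')

def blockify (filtered_words : List String) (block_size : Int) : List (String × Int) :=
  (blockifyLoop block_size filtered_words ([], 0)).1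

-- ===== PORT B =====
def blockify_alt (filtered_words : List String) (block_size : Int) : List (String × Int) :=
  (PySem.List.enumerate (PySem.List.pyRange 0 (filtered_words.length : Int) block_size) 1).foldl
    (fun out p =>
      out ++ (PySem.List.slice filtered_words (some p.2) (some (p.2 + block_size))).map
        (fun t => (t, p.1))) []

-- ===== PRECONDITION & SPEC =====
-- Pre_ restricts to positive block sizes, the task's natural domain: at block_size = 0 Python A
-- raises ZeroDivisionError (and B ValueError), and for negative block sizes A's tagging is an
-- accident of Python's modulo sign rules (B naturally returns [] there).
def Pre_blockify (filtered_words : List String) (block_size : Int) : Prop := 1 ≤ block_size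
instance (filtered_words : List String) (block_size : Int) : Decidable (Pre_blockify filtered_words block_size) := by unfold Pre_blockify; infer_instance
def pvWitness_blockify : List String × Int := (["alpha", "beta", "gamma"], 2)

def Spec_blockify (filtered_words : List String) (block_size : Int) (out : List (String × Int)) : Prop := out = blockify_alt filtered_words block_size
instance (filtered_words : List String) (block_size : Int) (out : List (String × Int)) : Decidable (Spec_blockify filtered_words block_size out) := by unfold Spec_blockify; infer_instance

-- ===== CLAIM (what is proved, stated in full; the proofs are below) =====
def Claim_equal_blockify : Prop := ∀ (filtered_words : List String) (block_size : Int), Dom_blockify filtered_words block_size → Pre_blockify filtered_words block_size → Spec_blockify filtered_words block_size (blockify filtered_words block_size)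

-- ===== LEMMAS AND PROOFS =====

-- the common normal form both ports are reduced to: word i gets block number i // bs + k
def blockTag (bs k : Int) (ws : List String) : List (String × Int) :=
  (PySem.List.enumerate ws 0).map (fun p => (p.2, PySem.Int.floordiv p.1 bs + k))

-- ---- A-side ----

-- the block number held after n words have been processed
def gBlock (a : Nat) : Nat → Nat
  | 0 => 0
  | n + 1 => if a ∣ n then gBlock a n + 1 else gBlock a n

lemma gBlock_succ (a : Nat) (_ha : 0 < a) : ∀ n : Nat, gBlock a (n + 1) = n / a + 1 := by
  intro n
  induction n with
  | zero => simp [gBlock]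
  | succ m ih =>
      show (if a ∣ m + 1 then gBlock a (m + 1) + 1 else gBlock a (m + 1)) = (m + 1) / a + 1
      rw [ih, Nat.succ_div]
      split_ifs <;> omega

lemma loop_eq (block_size : Int) (hbs : block_size ≠ 0) :
    ∀ (ws : List String) (n : Nat) (acc : List (String × Int)), acc.length = n →
      (blockifyLoop block_size ws (acc, (gBlock block_size.natAbs n : Int))).1 =
        acc ++ (PySem.List.enumerate ws (n : Int)).map
          (fun p => (p.2, PySem.Int.floordiv p.1 ((block_size.natAbs : Int)) + 1)) := by
  intro ws
  induction ws with
  | nil => intro n acc h; simp [blockifyLoop, PySem.List.enumerate_nil]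
  | cons t ts ih =>
      intro n acc h
      have ha : 0 < block_size.natAbs := Int.natAbs_pos.mpr hbs
      have hcond : (PySem.Int.mod (acc.length : Int) block_size = 0) ↔ block_size.natAbs ∣ n := by
        rw [PySem.Int.mod_eq_zero_iff_dvd, h]
        constructor
        · intro hd; exact_mod_cast (Int.natAbs_dvd.mpr hd)
        · intro hd; exact Int.natAbs_dvd.mp (by exact_mod_cast hd)
      have hbn' : (if PySem.Int.mod (acc.length : Int) block_size = 0
            then (gBlock block_size.natAbs n : Int) + 1 else (gBlock block_size.natAbs n : Int))
          = (gBlock block_size.natAbs (n + 1) : Int) := by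
        by_cases hd : block_size.natAbs ∣ n
        · rw [if_pos (hcond.mpr hd)]; simp [gBlock, hd]
        · rw [if_neg (fun hc => hd (hcond.mp hc))]; simp [gBlock, hd]
      have hval : (gBlock block_size.natAbs (n + 1) : Int) =
          PySem.Int.floordiv (n : Int) ((block_size.natAbs : Int)) + 1 := by
        rw [gBlock_succ _ ha n, PySem.Int.floordiv_natCast]
        push_cast
        ring
      show (blockifyLoop block_size ts
          (acc ++ [(t, if PySem.Int.mod (acc.length : Int) block_size = 0
              then (gBlock block_size.natAbs n : Int) + 1 else (gBlock block_size.natAbs n : Int))],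
           if PySem.Int.mod (acc.length : Int) block_size = 0
              then (gBlock block_size.natAbs n : Int) + 1 else (gBlock block_size.natAbs n : Int))).1 = _
      rw [hbn']
      have hlen : (acc ++ [(t, (gBlock block_size.natAbs (n + 1) : Int))]).length = n + 1 := by
        simp [h]
      rw [ih (n + 1) _ hlen]
      rw [PySem.List.enumerate_cons]
      simp [hval]

lemma blockify_eq_blockTag (ws : List String) (bs : Int) (hbs : 1 ≤ bs) :
    blockify ws bs = blockTag bs 1 ws := by
  have h := loop_eq bs (by omega) ws 0 [] rfl
  have hcast : ((bs.natAbs : Int)) = bs := Int.natAbs_of_nonneg (by omega)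
  unfold blockify blockTag
  simpa [gBlock, hcast] using h

-- ---- B-side ----

lemma pyRange_cons_pos (a b s : Int) (hs : 0 < s) (hab : a < b) :
    PySem.List.pyRange a b s = a :: PySem.List.pyRange (a + s) b s := by
  rw [PySem.List.pyRange_of_pos _ _ hs, PySem.List.pyRange_of_pos _ _ hs, if_pos hab]
  by_cases h2 : a + s < b
  · rw [if_pos h2]
    have hm : ((b - a + s - 1) / s).toNat = ((b - (a + s) + s - 1) / s).toNat + 1 := by
      have : b - a + s - 1 = (b - (a + s) + s - 1) + 1 * s := by ring
      rw [this, Int.add_mul_ediv_right _ _ (by omega)]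
      have hnn : 0 ≤ (b - (a + s) + s - 1) / s := Int.ediv_nonneg (by omega) (by omega)
      omega
    rw [hm, List.range_succ_eq_map, List.map_cons, List.map_map]
    congr 1
    · ring
    · apply List.map_congr_left; intro k _; simp [Function.comp]; ring
  · rw [if_neg h2]
    have hm : ((b - a + s - 1) / s).toNat = 1 := by
      have h0 : (b - a + s - 1) / s = 1 := by
        have : b - a + s - 1 = (b - a - 1) + 1 * s := by ring
        rw [this, Int.add_mul_ediv_right _ _ (by omega)]
        rw [Int.ediv_eq_zero_of_lt (by omega) (by omega)]
        omega
      omega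
    rw [hm]
    simp

lemma pyRange_shift (a b c s : Int) (hs : 0 < s) :
    PySem.List.pyRange (a + c) (b + c) s = (PySem.List.pyRange a b s).map (· + c) := by
  rw [PySem.List.pyRange_of_pos _ _ hs, PySem.List.pyRange_of_pos _ _ hs]
  have : b + c - (a + c) = b - a := by ring
  rw [this]
  have hiff : a + c < b + c ↔ a < b := by omega
  simp only [hiff, List.map_map]
  apply List.map_congr_left; intro k _; simp [Function.comp]; ring

lemma enumerate_map {α β : Type} (f : α → β) :
    ∀ (l : List α) (s : Int),
      PySem.List.enumerate (l.map f) s = (PySem.List.enumerate l s).map (fun p => (p.1, f p.2)) := by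
  intro l
  induction l with
  | nil => intro s; simp [PySem.List.enumerate_nil]
  | cons x xs ih => intro s; simp [PySem.List.enumerate_cons, ih]

lemma enumerate_shift {α : Type} :
    ∀ (l : List α) (s : Int),
      PySem.List.enumerate l s = (PySem.List.enumerate l 0).map (fun p => (p.1 + s, p.2)) := by
  intro l
  induction l with
  | nil => intro s; simp [PySem.List.enumerate_nil]
  | cons x xs ih =>
      intro s
      rw [PySem.List.enumerate_cons, PySem.List.enumerate_cons, ih (s + 1), ih (0 + 1)]
      rw [List.map_cons, List.map_map]
      congr 1
      · simp
      · apply List.map_congr_left; intro p _; simp [Function.comp]; omega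

-- splitting the normal form at the first block boundary
lemma blockTag_split (bs : Int) (hbs : 1 ≤ bs) (ws : List String) (k : Int) :
    blockTag bs k ws =
      (ws.take bs.toNat).map (fun t => (t, k)) ++ blockTag bs (k + 1) (ws.drop bs.toNat) := by
  unfold blockTag
  conv_lhs => rw [← List.take_append_drop bs.toNat ws]
  rw [PySem.List.enumerate_append, List.map_append]
  congr 1
  · have : ∀ p ∈ PySem.List.enumerate (ws.take bs.toNat) 0,
        (p.2, PySem.Int.floordiv p.1 bs + k) = (p.2, k) := by
      intro p hp
      rcases (PySem.List.mem_enumerate_iff _ _ _).1 hp with ⟨j, hj, rfl⟩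
      have hjb : (j : Int) < bs := by
        have := hj; simp [List.length_take] at this; omega
      simp only
      rw [PySem.Int.floordiv_eq_ediv_of_pos (by omega),
        Int.ediv_eq_zero_of_lt (by omega) (by omega)]
      simp
    rw [List.map_congr_left this,
      show (fun p : Int × String => (p.2, k)) = ((fun t => (t, k)) ∘ (·.2)) from rfl,
      ← List.map_map, PySem.List.map_snd_enumerate]
  · rw [enumerate_shift (ws.drop bs.toNat) (0 + (ws.take bs.toNat).length)]
    rw [List.map_map]
    apply List.map_congr_left
    intro p hp
    rcases (PySem.List.mem_enumerate_iff _ _ _).1 hp with ⟨j, hj, rfl⟩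
    simp only [Function.comp]
    congr 1
    by_cases hlen : bs.toNat ≤ ws.length
    · have htl : ((ws.take bs.toNat).length : Int) = bs := by
        simp [List.length_take]; omega
      rw [PySem.Int.floordiv_eq_ediv_of_pos (by omega),
          PySem.Int.floordiv_eq_ediv_of_pos (by omega)]
      have : (0 : Int) + (j : Int) + (0 + ((ws.take bs.toNat).length : Int))
          = ((0 : Int) + (j : Int)) + 1 * bs := by rw [htl]; ring
      rw [this, Int.add_mul_ediv_right _ _ (by omega : bs ≠ 0)]
      ring
    · -- drop is empty, so there is no such j
      exfalso
      simp [List.length_drop] at hj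
      omega

lemma chunkB (bs : Int) (hbs : 1 ≤ bs) :
    ∀ (fuel : Nat) (ws : List String), ws.length ≤ fuel → ∀ (k : Int),
      ((PySem.List.enumerate (PySem.List.pyRange 0 (ws.length : Int) bs) k).flatMap
        (fun p => (PySem.List.slice ws (some p.2) (some (p.2 + bs))).map (fun t => (t, p.1))))
      = blockTag bs k ws := by
  intro fuel
  induction fuel with
  | zero =>
      intro ws hlen k
      have : ws = [] := List.length_eq_zero_iff.mp (by omega)
      subst this
      simp [PySem.List.pyRange_of_pos _ _ (by omega : (0:Int) < bs),
        PySem.List.enumerate_nil, blockTag]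
  | succ m ih =>
      intro ws hlen k
      rcases ws with _ | ⟨w, ws'⟩
      · simp [PySem.List.pyRange_of_pos _ _ (by omega : (0:Int) < bs),
          PySem.List.enumerate_nil, blockTag]
      set l := w :: ws' with hl
      have hn : (0 : Int) < (l.length : Int) := by simp [hl]
      rw [pyRange_cons_pos 0 (l.length : Int) bs (by omega) hn,
        PySem.List.enumerate_cons, List.flatMap_cons]
      -- head chunk
      have hhead : (PySem.List.slice l (some 0) (some (0 + bs))).map (fun t => (t, k))
          = (l.take bs.toNat).map (fun t => (t, k)) := by
        rw [zero_add, PySem.List.slice_zero_start, PySem.List.slice_to _ (by omega)]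
      -- tail chunks: shift the range down by bs
      have hshift : PySem.List.pyRange (0 + bs) (l.length : Int) bs
          = (PySem.List.pyRange 0 ((l.drop bs.toNat).length : Int) bs).map (· + bs) := by
        by_cases hcase : bs < (l.length : Int)
        · have hdl : ((l.drop bs.toNat).length : Int) = (l.length : Int) - bs := by
            simp [List.length_drop]; omega
          rw [hdl]
          have : (l.length : Int) = ((l.length : Int) - bs) + bs := by ring
          conv_lhs => rw [this]
          exact pyRange_shift _ _ _ _ (by omega)
        · have h1 : PySem.List.pyRange (0 + bs) (l.length : Int) bs = [] := by
            rw [PySem.List.pyRange_of_pos _ _ (by omega : (0:Int) < bs),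
              if_neg (by omega)]
            simp
          have hdl : ((l.drop bs.toNat).length : Int) = 0 := by
            simp [List.length_drop]; omega
          rw [h1, hdl]
          rw [PySem.List.pyRange_of_pos _ _ (by omega : (0:Int) < bs), if_neg (by omega)]
          simp
      rw [hshift, enumerate_map, List.flatMap_map]
      simp only []
      -- each shifted slice is a slice of the dropped list
      have hslices : List.flatMap
            (fun p : Int × Int => (PySem.List.slice l (some (p.2 + bs)) (some ((p.2 + bs) + bs))).map (fun t => (t, p.1)))
            (PySem.List.enumerate (PySem.List.pyRange 0 ((l.drop bs.toNat).length : Int) bs) (k + 1))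
          = List.flatMap
            (fun p => (PySem.List.slice (l.drop bs.toNat) (some p.2) (some (p.2 + bs))).map (fun t => (t, p.1)))
            (PySem.List.enumerate (PySem.List.pyRange 0 ((l.drop bs.toNat).length : Int) bs) (k + 1)) := by
        apply List.flatMap_congr
        intro p hp
        rcases (PySem.List.mem_enumerate_iff _ _ _).1 hp with ⟨j, hj, rfl⟩
        simp only []
        have hmem : (PySem.List.pyRange 0 ((l.drop bs.toNat).length : Int) bs)[j] ∈
            PySem.List.pyRange 0 ((l.drop bs.toNat).length : Int) bs := List.getElem_mem hj
        have hx := (PySem.List.mem_pyRange_iff_of_pos (by omega : (0:Int) < bs) _).1 hmem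
        set x := (PySem.List.pyRange 0 ((l.drop bs.toNat).length : Int) bs)[j] with hxdef
        have hx0 : 0 ≤ x := hx.1
        congr 1
        rw [PySem.List.slice_toNat _ (by omega) (by omega),
          PySem.List.slice_toNat _ (by omega) (by omega),
          List.drop_drop]
        congr 1
        · omega
        · congr 1; omega
      rw [hslices]
      -- the tail is exactly the recursive case on the dropped list
      have hdrop : (l.drop bs.toNat).length ≤ m := by
        simp [List.length_drop]
        have : l.length ≤ m + 1 := hlen
        have hb1 : 1 ≤ bs.toNat := by omega
        omega
      have htail := ih (l.drop bs.toNat) hdrop (k + 1)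
      rw [htail, hhead]
      exact (blockTag_split bs hbs l k).symm

lemma blockify_alt_eq_blockTag (ws : List String) (bs : Int) (hbs : 1 ≤ bs) :
    blockify_alt ws bs = blockTag bs 1 ws := by
  unfold blockify_alt
  rw [PySem.List.foldl_append_eq_flatMap]
  simpa using chunkB bs hbs ws.length ws le_rfl 1

-- ===== VERDICT (by name: the statement is the Claim_ definition above) =====
theorem blockify_spec : Claim_equal_blockify := by
  intro ws bs _ hbs
  unfold Spec_blockify
  rw [blockify_eq_blockTag ws bs hbs, blockify_alt_eq_blockTag ws bs hbs]
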